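-- pv_equiv track=rewrite | github.com/dp-IED/incident.io-take-home | utils/schedule_utils.py | merge_consecutive_entries
-- ===== SOURCE A (Python) =====
-- def merge_consecutive_entries(entries: list[dict]) -> list[dict]:
--     """
--     Merge consecutive entries with the same user.
--
--     If a user has multiple consecutive shifts (e.g., due to override splits),
--     combine them into a single entry.
--
--     Args:
--         entries: Schedule entries to merge
--
--     Returns:
--         Merged schedule entries
--     """
--     if not entries:
--         return []
--
--     merged_entries = []
--     current_merged = entries[0].copy()
--
--     for entry in entries[1:]:
--         if entry['user'] == current_merged['user'] and entry['start_at'] == current_merged['end_at']: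
--             # Merge
--             current_merged['end_at'] = entry['end_at']
--         else:
--             merged_entries.append(current_merged)
--             current_merged = entry.copy()
--
--     merged_entries.append(current_merged)
--
--     return merged_entries
-- ===== SOURCE B (Python) =====
-- def merge_consecutive_entries(entries: list[dict]) -> list[dict]:
--     """Group-then-combine reformulation: first partition the entries into
--     contiguous runs (a new run starts whenever the user changes or the shift
--     is not back-to-back with the previous one), then collapse each run into
--     a single entry covering the whole run."""
--     if not entries:
--         return []
--     runs = [[entries[0]]]
--     for prev, cur in zip(entries, entries[1:]):
--         if cur['user'] == prev['user'] and cur['start_at'] == prev['end_at']: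
--             runs[-1].append(cur)
--         else:
--             runs.append([cur])
--     merged_entries = []
--     for run in runs:
--         merged = dict(run[0])
--         if len(run) > 1:
--             merged['end_at'] = run[-1]['end_at']
--         merged_entries.append(merged)
--     return merged_entries
-- ===== Notes on version B (the rewrite author's own statement) =====
-- stated objective: alternative
-- what changed: Replaces A's rolling in-place merge (mutating a current accumulator dict while iterating) by a two-phase group-then-combine: partition entries into contiguous runs by scanning consecutive pairs with zip, then build one merged dict per run from its first entry and the run's last end_at.
import Mathlib
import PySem

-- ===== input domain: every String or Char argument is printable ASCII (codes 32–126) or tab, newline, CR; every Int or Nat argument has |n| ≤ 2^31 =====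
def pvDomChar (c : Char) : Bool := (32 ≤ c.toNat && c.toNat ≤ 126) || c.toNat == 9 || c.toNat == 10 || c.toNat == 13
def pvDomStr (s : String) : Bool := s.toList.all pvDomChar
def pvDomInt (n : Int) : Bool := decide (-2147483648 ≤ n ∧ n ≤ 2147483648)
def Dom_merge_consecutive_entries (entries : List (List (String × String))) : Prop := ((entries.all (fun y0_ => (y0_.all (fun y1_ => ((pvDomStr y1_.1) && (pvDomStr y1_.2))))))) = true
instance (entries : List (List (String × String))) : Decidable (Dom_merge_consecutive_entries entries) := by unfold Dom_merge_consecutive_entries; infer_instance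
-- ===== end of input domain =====

-- B restructures A's rolling in-place merge into two visibly distinct phases: partition the
-- entries into contiguous runs (scanning consecutive pairs), then combine each run into one
-- merged entry; same return value on Pre_ (objective: alternative decomposition, not speed).

-- dict lookup d[k] / d.get(k) on an entry represented as an insertion-ordered association list
def pvLookup (d : List (String × String)) (k : String) : Option String :=
  (PySem.Dict.mk d).get? k
-- dict write d[k] = v (overwrite in place, append if new)
def pvSet (d : List (String × String)) (k v : String) : List (String × String) :=
  ((PySem.Dict.mk d).insert k v).items

-- ===== PORT A =====
-- loop body of A: merge into current_merged or flush it and restart; entry['end_at'] is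
-- ported as (pvLookup …).getD "" — exact under Pre_ (the key is present; KeyError excluded)
def pvStepA (st : List (List (String × String)) × List (String × String))
    (entry : List (String × String)) :
    List (List (String × String)) × List (String × String) :=
  if pvLookup entry "user" == pvLookup st.2 "user" &&
     pvLookup entry "start_at" == pvLookup st.2 "end_at" then
    (st.1, pvSet st.2 "end_at" ((pvLookup entry "end_at").getD ""))
  else
    (st.1 ++ [st.2], entry)

def merge_consecutive_entries (entries : List (List (String × String))) : List (List (String × String)) :=
  match entries with
  | [] => []
  | e0 :: rest =>
    let st := rest.foldl pvStepA ([], e0)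
    st.1 ++ [st.2]

-- ===== PORT B =====
-- runs[-1].append(cur) on a nonempty list of runs
def pvAppendLast (runs : List (List (List (String × String)))) (x : List (String × String)) :
    List (List (List (String × String))) :=
  match runs with
  | [] => [[x]]
  | [r] => [r ++ [x]]
  | r :: rs => r :: pvAppendLast rs x

-- loop body of B's partitioning pass over zip(entries, entries[1:]): pc = (prev, cur)
def pvStepB (runs : List (List (List (String × String))))
    (pc : List (String × String) × List (String × String)) :
    List (List (List (String × String))) :=
  if pvLookup pc.2 "user" == pvLookup pc.1 "user" &&
     pvLookup pc.2 "start_at" == pvLookup pc.1 "end_at" then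
    pvAppendLast runs pc.2
  else
    runs ++ [[pc.2]]

-- combine phase: merged = dict(run[0]); if len(run) > 1: merged['end_at'] = run[-1]['end_at']
def pvCombineRun (run : List (List (String × String))) : List (String × String) :=
  if 1 < run.length then
    pvSet (run.headD []) "end_at" ((pvLookup (run.getLastD []) "end_at").getD "")
  else
    run.headD []

def merge_consecutive_entries_alt (entries : List (List (String × String))) : List (List (String × String)) :=
  match entries with
  | [] => []
  | e0 :: rest =>
    let runs := ((e0 :: rest).zip rest).foldl pvStepB [[e0]]
    runs.map pvCombineRun

-- ===== PRECONDITION & SPEC =====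
-- a well-formed schedule dict: the three fields A's loop reads are present
def pvGoodEntry (e : List (String × String)) : Prop :=
  (pvLookup e "user").isSome = true ∧ (pvLookup e "start_at").isSome = true ∧
  (pvLookup e "end_at").isSome = true

-- Pre_ excludes lists of two or more entries in which some entry lacks a 'user'/'start_at'/
-- 'end_at' field: A raises KeyError on such inputs, except when every comparison
-- short-circuits on a differing user — and on those inputs both implementations agree anyway.
def Pre_merge_consecutive_entries (entries : List (List (String × String))) : Prop :=
  entries.length ≤ 1 ∨ ∀ e ∈ entries, pvGoodEntry e

instance (entries : List (List (String × String))) : Decidable (Pre_merge_consecutive_entries entries) := by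
  unfold Pre_merge_consecutive_entries pvGoodEntry; infer_instance

def pvWitness_merge_consecutive_entries : (List (List (String × String))) :=
  [[("user", "alice"), ("start_at", "1"), ("end_at", "2")],
   [("user", "alice"), ("start_at", "2"), ("end_at", "3")],
   [("user", "bob"), ("start_at", "3"), ("end_at", "4")]]

def Spec_merge_consecutive_entries (entries : List (List (String × String))) (out : List (List (String × String))) : Prop := out = merge_consecutive_entries_alt entries
instance (entries : List (List (String × String))) (out : List (List (String × String))) : Decidable (Spec_merge_consecutive_entries entries out) := by unfold Spec_merge_consecutive_entries; infer_instance

-- ===== CLAIM (what is proved, stated in full; the proofs are below) =====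
def Claim_equal_merge_consecutive_entries : Prop := ∀ (entries : List (List (String × String))), Dom_merge_consecutive_entries entries → Pre_merge_consecutive_entries entries → Spec_merge_consecutive_entries entries (merge_consecutive_entries entries)

-- ===== LEMMAS AND PROOFS =====

lemma pvLookup_set_self (d : List (String × String)) (k v : String) :
    pvLookup (pvSet d k v) k = some v := by
  show ((PySem.Dict.mk d).insert k v).get? k = some v
  rw [PySem.Dict.get?_insert]
  simp

lemma pvLookup_set_ne (d : List (String × String)) (k v k' : String) (h : k' ≠ k) :
    pvLookup (pvSet d k v) k' = pvLookup d k' := by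
  show ((PySem.Dict.mk d).insert k v).get? k' = (PySem.Dict.mk d).get? k'
  rw [PySem.Dict.get?_insert]
  simp [h]

lemma pvSet_set (d : List (String × String)) (k v w : String) :
    pvSet (pvSet d k v) k w = pvSet d k w := by
  show (((PySem.Dict.mk d).insert k v).insert k w).items = ((PySem.Dict.mk d).insert k w).items
  rw [PySem.Dict.insert_insert_self]

lemma pvAppendLast_snoc (rs : List (List (List (String × String)))) (r : List (List (String × String)))
    (x : List (String × String)) :
    pvAppendLast (rs ++ [r]) x = rs ++ [r ++ [x]] := by
  induction rs with
  | nil => rfl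
  | cons r0 rs ih =>
    cases rs with
    | nil => rfl
    | cons r1 rs' => simpa [pvAppendLast] using ih

lemma pvGetLastD_mem {α : Type} (l : List α) (d : α) (h : l ≠ []) : l.getLastD d ∈ l := by
  induction l with
  | nil => exact absurd rfl h
  | cons x xs ih =>
    cases xs with
    | nil => simp
    | cons y ys =>
      have := ih (by simp)
      simp only [List.getLastD_cons] at *
      exact List.mem_cons_of_mem _ this

lemma pvHeadD_append_of_ne_nil {α : Type} (l l' : List α) (d : α) (h : l ≠ []) :
    (l ++ l').headD d = l.headD d := by
  cases l with
  | nil => exact absurd rfl h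
  | cons x xs => rfl

-- A's rolling current_merged agrees with the combine of B's pending run on the keys the
-- loop condition reads
lemma pvComb_user (r : List (List (String × String))) (hne : r ≠ [])
    (huser : ∀ x ∈ r, pvLookup x "user" = pvLookup (r.headD []) "user") :
    pvLookup (pvCombineRun r) "user" = pvLookup (r.getLastD []) "user" := by
  cases r with
  | nil => exact absurd rfl hne
  | cons p t =>
    cases t with
    | nil => rfl
    | cons q t' =>
      rw [pvCombineRun, if_pos (by simp), pvLookup_set_ne _ _ _ _ (by decide)]
      exact (huser _ (pvGetLastD_mem _ [] (by simp))).symm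

lemma pvComb_end (r : List (List (String × String))) (hne : r ≠ [])
    (hend : 1 < r.length → (pvLookup (r.getLastD []) "end_at").isSome = true) :
    pvLookup (pvCombineRun r) "end_at" = pvLookup (r.getLastD []) "end_at" := by
  cases r with
  | nil => exact absurd rfl hne
  | cons p t =>
    cases t with
    | nil => rfl
    | cons q t' =>
      obtain ⟨vl, hvl⟩ := Option.isSome_iff_exists.mp (hend (by simp))
      rw [pvCombineRun, if_pos (by simp), pvLookup_set_self, hvl]
      rfl

-- the central invariant: A's rolling state and B's run partition stay in lockstep
lemma pv_loop_inv (rest : List (List (String × String)))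
    (rs : List (List (List (String × String)))) (r : List (List (String × String)))
    (hrest : ∀ e ∈ rest, pvGoodEntry e) (hne : r ≠ [])
    (huser : ∀ x ∈ r, pvLookup x "user" = pvLookup (r.headD []) "user")
    (hend : 1 < r.length → (pvLookup (r.getLastD []) "end_at").isSome = true) :
    (rest.foldl pvStepA (rs.map pvCombineRun, pvCombineRun r)).1 ++
      [(rest.foldl pvStepA (rs.map pvCombineRun, pvCombineRun r)).2] =
    (((r.getLastD [] :: rest).zip rest).foldl pvStepB (rs ++ [r])).map pvCombineRun := by
  induction rest generalizing rs r with
  | nil => simp [List.map_append]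
  | cons e rest' ih =>
    have hPe : pvGoodEntry e := hrest e (by simp)
    have hcu := pvComb_user r hne huser
    have hce := pvComb_end r hne hend
    have hrest' : ∀ x ∈ rest', pvGoodEntry x := fun x hx => hrest x (by simp [hx])
    simp only [List.zip_cons_cons, List.foldl_cons]
    rw [show pvStepA (rs.map pvCombineRun, pvCombineRun r) e =
        if pvLookup e "user" == pvLookup (r.getLastD []) "user" &&
           pvLookup e "start_at" == pvLookup (r.getLastD []) "end_at" then
          (rs.map pvCombineRun, pvSet (pvCombineRun r) "end_at" ((pvLookup e "end_at").getD ""))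
        else (rs.map pvCombineRun ++ [pvCombineRun r], e) from by
      rw [pvStepA, hcu, hce]]
    rw [show pvStepB (rs ++ [r]) (r.getLastD [], e) =
        if pvLookup e "user" == pvLookup (r.getLastD []) "user" &&
           pvLookup e "start_at" == pvLookup (r.getLastD []) "end_at" then
          pvAppendLast (rs ++ [r]) e
        else (rs ++ [r]) ++ [[e]] from rfl]
    by_cases hcond : (pvLookup e "user" == pvLookup (r.getLastD []) "user" &&
        pvLookup e "start_at" == pvLookup (r.getLastD []) "end_at") = true
    · rw [if_pos hcond, if_pos hcond, pvAppendLast_snoc]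
      have hmerge : pvSet (pvCombineRun r) "end_at" ((pvLookup e "end_at").getD "") =
          pvCombineRun (r ++ [e]) := by
        cases r with
        | nil => exact absurd rfl hne
        | cons p t =>
          cases t with
          | nil => rfl
          | cons q t' =>
            rw [pvCombineRun, if_pos (by simp), pvSet_set,
                pvCombineRun, if_pos (by simp), pvHeadD_append_of_ne_nil _ [e] [] (by simp),
                List.getLastD_concat]
      have huser' : ∀ x ∈ r ++ [e], pvLookup x "user" = pvLookup ((r ++ [e]).headD []) "user" := by
        rw [pvHeadD_append_of_ne_nil r [e] [] hne]
        intro x hx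
        rcases List.mem_append.mp hx with hx | hx
        · exact huser x hx
        · have hx' : x = e := by simpa using hx
          have heq : pvLookup e "user" = pvLookup (r.getLastD []) "user" := by
            have := (Bool.and_eq_true _ _).mp hcond |>.1
            simpa using this
          rw [hx', heq]
          exact huser _ (pvGetLastD_mem r [] hne)
      have hend' : 1 < (r ++ [e]).length → (pvLookup ((r ++ [e]).getLastD []) "end_at").isSome = true := by
        intro _
        rw [List.getLastD_concat]
        exact hPe.2.2
      have := ih rs (r ++ [e]) hrest' (by simp) huser' hend'
      rw [List.getLastD_concat] at this
      rw [hmerge]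
      exact this
    · rw [if_neg hcond, if_neg hcond]
      have := ih (rs ++ [r]) [e] hrest' (by simp)
        (by intro x hx; rw [List.mem_singleton.mp hx]; rfl)
        (by intro h; simp at h)
      have hcombe : pvCombineRun [e] = e := rfl
      rw [hcombe] at this
      simp only [List.getLastD_cons, List.getLastD_nil] at this
      rw [show (rs.map pvCombineRun ++ [pvCombineRun r]) = (rs ++ [r]).map pvCombineRun from by
        simp [List.map_append]]
      rw [List.append_assoc] at this ⊢
      simpa using this

-- ===== VERDICT (by name: the statement is the Claim_ definition above) =====
theorem merge_consecutive_entries_spec : Claim_equal_merge_consecutive_entries := by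
  intro entries _hdom hpre
  unfold Spec_merge_consecutive_entries
  cases entries with
  | nil => rfl
  | cons e0 rest =>
    cases rest with
    | nil => rfl
    | cons e1 rest' =>
      have hgood : ∀ e ∈ e0 :: e1 :: rest', pvGoodEntry e := by
        rcases hpre with h | h
        · simp at h
        · exact h
      have hrest : ∀ e ∈ e1 :: rest', pvGoodEntry e := fun e he => hgood e (by simp [he])
      have h := pv_loop_inv (e1 :: rest') [] [e0] hrest (by simp)
        (by intro x hx; rw [List.mem_singleton.mp hx]; rfl)
        (by intro h; simp at h)
      have hcomb : pvCombineRun [e0] = e0 := rfl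
      rw [hcomb] at h
      simp only [List.getLastD_cons, List.getLastD_nil, List.map_nil, List.nil_append] at h
      simpa [merge_consecutive_entries, merge_consecutive_entries_alt] using h
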